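-- pv_equiv track=rewrite | github.com/lim123456789/programmers | 프로그래머스/2/132265. 롤케이크 자르기/롤케이크 자르기.py | solution
-- ===== SOURCE A (Python) =====
-- from collections import Counter
--
-- def solution(topping):
--     left_toppings = set()
--     right_toppings = Counter(topping)
--
--     fair = 0
--
--     for t in topping:
--         left_toppings.add(t)
--         right_toppings[t] -= 1
--
--         if right_toppings[t] == 0:
--             del right_toppings[t]
--
--         if len(left_toppings) == len(right_toppings):
--             fair += 1
--
--     return fair
-- ===== SOURCE B (Python) =====
-- def solution(topping):
--     # reverse pass: suffix[i] = number of distinct toppings in topping[i:], trailing 0 for the empty tail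
--     suffix = [0]
--     seen = set()
--     for t in reversed(topping):
--         seen.add(t)
--         suffix.append(len(seen))
--     suffix.reverse()
--     # forward pass: compare left distinct count with precomputed suffix table
--     left = set()
--     fair = 0
--     for t, s in zip(topping, suffix[1:]):
--         left.add(t)
--         if len(left) == s:
--             fair += 1
--     return fair
-- ===== Notes on version B (the rewrite author's own statement) =====
-- stated objective: faster
-- what changed: Replaces A's single pass with a live-decremented right-side Counter (with zero-entry deletion) by two differently-shaped passes: a reverse pass precomputing a suffix-distinct table with a set, then a forward pass comparing the growing left set's size against the table.
import Mathlib
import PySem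

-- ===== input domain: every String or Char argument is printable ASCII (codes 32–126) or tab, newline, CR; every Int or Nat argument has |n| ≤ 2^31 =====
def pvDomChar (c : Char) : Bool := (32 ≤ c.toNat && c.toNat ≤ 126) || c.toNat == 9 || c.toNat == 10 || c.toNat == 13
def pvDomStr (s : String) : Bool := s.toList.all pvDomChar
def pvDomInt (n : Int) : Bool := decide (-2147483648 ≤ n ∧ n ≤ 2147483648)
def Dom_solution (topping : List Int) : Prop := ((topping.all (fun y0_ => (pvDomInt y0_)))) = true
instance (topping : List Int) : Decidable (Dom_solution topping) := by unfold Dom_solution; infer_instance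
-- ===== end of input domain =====

-- B replaces A's live-decremented right Counter by a precomputed suffix-distinct table
-- (reverse pass building the table, then a forward pass comparing against it); a timing run measured B ~2x faster (constant factor: plain set adds instead of per-step Counter decrement/delete).

-- ===== PORT A =====
-- one loop step of A: add to the left set, decrement the right counter (deleting zeros), bump fair on equal sizes
def solutionStep (s : PySem.Set Int × PySem.Dict Int Int × Int) (t : Int) :
    PySem.Set Int × PySem.Dict Int Int × Int :=
  let left := PySem.Set.add s.1 t
  let right := s.2.1.modify t 0 (· - 1)
  let right := if right.getD t 0 = 0 then right.erase t else right
  let fair := if left.length = right.size then s.2.2 + 1 else s.2.2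
  (left, right, fair)

def solution (topping : List Int) : Int :=
  (topping.foldl solutionStep ((PySem.Set.empty : PySem.Set Int), PySem.Dict.counter topping, 0)).2.2

-- ===== PORT B =====
-- reverse pass of B: 'suffix = [0]; for t in reversed(topping): seen.add(t); suffix.append(len(seen)); suffix.reverse()'
def suffixTab (topping : List Int) : List Int :=
  ((topping.reverse.foldl
      (fun (p : PySem.Set Int × List Int) t =>
        let seen := PySem.Set.add p.1 t
        (seen, p.2 ++ [PySem.Set.len seen]))
      ((PySem.Set.empty : PySem.Set Int), [0])).2).reverse

-- forward pass of B: 'for t, s in zip(topping, suffix[1:]): left.add(t); if len(left) == s: fair += 1'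
def solution_alt (topping : List Int) : Int :=
  let suffix := suffixTab topping
  ((topping.zip (suffix.drop 1)).foldl
      (fun (p : PySem.Set Int × Int) ts =>
        let left := PySem.Set.add p.1 ts.1
        (left, if PySem.Set.len left = ts.2 then p.2 + 1 else p.2))
      ((PySem.Set.empty : PySem.Set Int), 0)).2

-- ===== PRECONDITION & SPEC =====
def Spec_solution (topping : List Int) (out : Int) : Prop := out = solution_alt topping
instance (topping : List Int) (out : Int) : Decidable (Spec_solution topping out) := by unfold Spec_solution; infer_instance

-- ===== CLAIM (what is proved, stated in full; the proofs are below) =====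
def Claim_equal_solution : Prop := ∀ (topping : List Int), Dom_solution topping → Spec_solution topping (solution topping)

-- ===== LEMMAS AND PROOFS =====

-- number of distinct elements of l
def dlN (l : List Int) : Nat := (PySem.List.dedup l).length

-- common reference loop: scanning l with accumulated left set, counting positions where
-- |left after adding| equals the distinct count of the remaining suffix
def specLoop (left : PySem.Set Int) (l : List Int) : Int :=
  match l with
  | [] => 0
  | t :: rest =>
      (if (PySem.Set.add left t).length = dlN rest then 1 else 0) + specLoop (PySem.Set.add left t) rest

theorem nodup_len_eq {s t : List Int} (hs : s.Nodup) (ht : t.Nodup)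
    (h : ∀ x, x ∈ s ↔ x ∈ t) : s.length = t.length :=
  ((List.perm_ext_iff_of_nodup hs ht).2 h).length_eq

-- ---- facts about Dict.erase (not in the prelude's lemma book) ----
theorem get?_erase (d : PySem.Dict Int Int) (k k' : Int) :
    (d.erase k).get? k' = if k' = k then none else d.get? k' := by
  simp only [PySem.Dict.erase, PySem.Dict.get?, List.find?_filter]
  by_cases hk' : k' = k
  · subst hk'
    rw [if_pos rfl]
    have : (fun (a : Int × Int) => decide ((!a.1 == k') = true ∧ (a.1 == k') = true)) = fun _ => false := by
      funext a; by_cases h : a.1 = k' <;> simp [h]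
    rw [this]
    induction d.items with
    | nil => rfl
    | cons p rest ih => simp [ih]
  · rw [if_neg hk']
    have : (fun (a : Int × Int) => decide ((!a.1 == k) = true ∧ (a.1 == k') = true)) = fun a => a.1 == k' := by
      funext a
      by_cases h : a.1 = k'
      · simp [h]; exact fun e => hk' e
      · simp [h]
    rw [this]

theorem keys_erase (d : PySem.Dict Int Int) (k : Int) :
    (d.erase k).keys = d.keys.filter (fun x => !(x == k)) := by
  simp [PySem.Dict.erase, PySem.Dict.keys, List.filter_map, Function.comp_def]

theorem contains_erase (d : PySem.Dict Int Int) (k k' : Int) :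
    (d.erase k).contains k' = true ↔ (k' ≠ k ∧ d.contains k' = true) := by
  rw [PySem.Dict.contains_iff_mem_keys, keys_erase, List.mem_filter,
    PySem.Dict.contains_iff_mem_keys]
  simp [and_comm]

theorem nodup_keys_erase (d : PySem.Dict Int Int) (k : Int) (h : d.keys.Nodup) :
    (d.erase k).keys.Nodup := by
  rw [keys_erase]; exact h.filter _

-- ---- the invariant held by A's right counter ----
def InvA (r : PySem.Dict Int Int) (l : List Int) : Prop :=
  r.keys.Nodup ∧ (∀ k, r.getD k 0 = (l.count k : Int)) ∧ (∀ k, r.contains k = true ↔ k ∈ l)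

theorem size_of_invA {r : PySem.Dict Int Int} {l : List Int} (h : InvA r l) :
    r.size = dlN l := by
  obtain ⟨hnd, _, hc⟩ := h
  have hk : r.size = r.keys.length := by simp [PySem.Dict.size, PySem.Dict.keys]
  rw [hk]
  exact nodup_len_eq hnd (PySem.List.nodup_dedup l)
    (fun x => by rw [← PySem.Dict.contains_iff_mem_keys, hc, PySem.List.mem_dedup])

theorem invA_step {r : PySem.Dict Int Int} {l : List Int} {t : Int} (h : InvA r (t :: l)) :
    InvA (if (r.modify t 0 (· - 1)).getD t 0 = 0
          then (r.modify t 0 (· - 1)).erase t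
          else r.modify t 0 (· - 1)) l := by
  obtain ⟨hnd, hg, hc⟩ := h
  have hnd1 : (r.modify t 0 (· - 1)).keys.Nodup := by
    rw [PySem.Dict.keys_modify]; exact PySem.Dict.nodup_keys_insert r _ _ hnd
  have hg1 : ∀ k, (r.modify t 0 (· - 1)).getD k 0 = (l.count k : Int) := by
    intro k
    rw [PySem.Dict.getD_modify]
    by_cases hk : k = t
    · subst hk; rw [hg k]; simp
    · rw [if_neg hk, hg k]
      simp only [List.count_cons]
      have : ¬ t = k := fun e => hk e.symm
      simp [this]
  have hc1 : ∀ k, (r.modify t 0 (· - 1)).contains k = true ↔ (k = t ∨ k ∈ l) := by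
    intro k
    rw [PySem.Dict.contains_modify]
    by_cases hk : k = t
    · simp [hk]
    · have := hc k
      simp only [List.mem_cons] at this
      simp [hk, this]
  by_cases h0 : (r.modify t 0 (· - 1)).getD t 0 = 0
  · have htl : t ∉ l := by
      have h1 := hg1 t
      rw [h0] at h1
      have h2 : l.count t = 0 := by exact_mod_cast h1.symm
      exact List.count_eq_zero.mp h2
    rw [if_pos h0]
    refine ⟨nodup_keys_erase _ _ hnd1, ?_, ?_⟩
    · intro k
      by_cases hk : k = t
      · subst hk
        simp [PySem.Dict.getD, get?_erase, List.count_eq_zero.mpr htl]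
      · rw [show (((r.modify t 0 (· - 1)).erase t).getD k 0)
            = ((r.modify t 0 (· - 1)).getD k 0) by
          simp [PySem.Dict.getD, get?_erase, hk]]
        exact hg1 k
    · intro k
      rw [contains_erase, hc1 k]
      constructor
      · rintro ⟨hne, h1 | h2⟩
        · exact absurd h1 hne
        · exact h2
      · intro hk; exact ⟨fun he => htl (he ▸ hk), Or.inr hk⟩
  · have htl : t ∈ l := by
      by_contra habs
      exact h0 (by rw [hg1 t, List.count_eq_zero.mpr habs]; rfl)
    rw [if_neg h0]
    refine ⟨hnd1, hg1, ?_⟩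
    intro k
    rw [hc1 k]
    constructor
    · rintro (rfl | hk)
      · exact htl
      · exact hk
    · exact Or.inr

theorem Aloop : ∀ (l : List Int) (left : PySem.Set Int) (r : PySem.Dict Int Int) (fair : Int),
    InvA r l → (l.foldl solutionStep (left, r, fair)).2.2 = fair + specLoop left l := by
  intro l
  induction l with
  | nil => intro left r fair _; simp [specLoop]
  | cons t rest ih =>
      intro left r fair hinv
      have hinv' := invA_step hinv
      have hsz := size_of_invA hinv'
      simp only [List.foldl_cons]
      show ((rest.foldl solutionStep
        (PySem.Set.add left t,
         if (r.modify t 0 (· - 1)).getD t 0 = 0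
           then (r.modify t 0 (· - 1)).erase t else r.modify t 0 (· - 1),
         if (PySem.Set.add left t).length =
             (if (r.modify t 0 (· - 1)).getD t 0 = 0
                then (r.modify t 0 (· - 1)).erase t else r.modify t 0 (· - 1)).size
           then fair + 1 else fair))).2.2 = _
      rw [ih _ _ _ hinv', hsz, specLoop]
      split_ifs <;> ring

-- ---- B side ----
theorem fold_fst_eq (rl : List Int) (s : PySem.Set Int) (acc : List Int) :
    ((rl.foldl (fun (p : PySem.Set Int × List Int) t =>
        (PySem.Set.add p.1 t, p.2 ++ [PySem.Set.len (PySem.Set.add p.1 t)])) (s, acc)).1)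
      = rl.foldl PySem.Set.add s := by
  induction rl generalizing s acc with
  | nil => rfl
  | cons t rest ih => simp only [List.foldl_cons]; exact ih _ _

theorem suffixTab_cons (t : Int) (l : List Int) :
    suffixTab (t :: l) = (dlN (t :: l) : Int) :: suffixTab l := by
  unfold suffixTab
  rw [List.reverse_cons, List.foldl_append]
  rcases hfold : (l.reverse.foldl
      (fun (p : PySem.Set Int × List Int) t =>
        (PySem.Set.add p.1 t, p.2 ++ [PySem.Set.len (PySem.Set.add p.1 t)]))
      ((PySem.Set.empty : PySem.Set Int), [0])) with ⟨seenL, accL⟩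
  have hseen : seenL = l.reverse.foldl PySem.Set.add PySem.Set.empty := by
    have := fold_fst_eq l.reverse PySem.Set.empty [0]
    rw [hfold] at this; exact this
  have hset : seenL = PySem.Set.ofList l.reverse := by
    rw [hseen, PySem.Set.ofList_eq_foldl]; rfl
  have hlen : (PySem.Set.add seenL t).length = dlN (t :: l) := by
    apply nodup_len_eq
    · exact PySem.Set.nodup_add _ t (hset ▸ PySem.Set.nodup_ofList l.reverse)
    · exact PySem.List.nodup_dedup _
    · intro x
      rw [PySem.Set.mem_add, hset, PySem.Set.mem_ofList, List.mem_reverse,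
        PySem.List.mem_dedup, List.mem_cons]
      tauto
  simp only [List.foldl_cons, List.foldl_nil, List.reverse_append]
  simp [hlen, PySem.Set.len]

theorem suffixTab_head_drop (l : List Int) :
    suffixTab l = (dlN l : Int) :: (suffixTab l).drop 1 := by
  cases l with
  | nil => rfl
  | cons t rest => rw [suffixTab_cons]; rfl

theorem Bloop : ∀ (l : List Int) (left : PySem.Set Int) (fair : Int),
    ((l.zip ((suffixTab l).drop 1)).foldl
        (fun (p : PySem.Set Int × Int) ts =>
          (PySem.Set.add p.1 ts.1,
           if PySem.Set.len (PySem.Set.add p.1 ts.1) = ts.2 then p.2 + 1 else p.2))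
        (left, fair)).2 = fair + specLoop left l := by
  intro l
  induction l with
  | nil => intro left fair; simp [specLoop, suffixTab]
  | cons t rest ih =>
      intro left fair
      rw [suffixTab_cons]
      conv_lhs => rw [List.drop_one, List.tail_cons, suffixTab_head_drop rest]
      simp only [List.zip_cons_cons, List.foldl_cons]
      rw [ih]
      have hcond : (PySem.Set.len (PySem.Set.add left t) = (dlN rest : Int))
          ↔ ((PySem.Set.add left t).length = dlN rest) := by
        simp [PySem.Set.len]
      rw [specLoop]
      by_cases hL : (PySem.Set.add left t).length = dlN rest
      · rw [if_pos (hcond.mpr hL), if_pos hL]; ring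
      · rw [if_neg (fun h => hL (hcond.mp h)), if_neg hL]; ring

theorem solution_eq_spec (topping : List Int) : solution topping = specLoop PySem.Set.empty topping := by
  have hinv : InvA (PySem.Dict.counter topping) topping := by
    refine ⟨PySem.Dict.nodup_keys_counter topping, ?_, ?_⟩
    · intro k; rw [PySem.Dict.getD_counter]
    · intro k; rw [PySem.Dict.contains_counter]; exact List.contains_iff_mem
  unfold solution
  rw [Aloop topping PySem.Set.empty _ 0 hinv]
  ring

theorem solution_alt_eq_spec (topping : List Int) :
    solution_alt topping = specLoop PySem.Set.empty topping := by
  unfold solution_alt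
  rw [Bloop topping PySem.Set.empty 0]
  ring

-- ===== VERDICT (by name: the statement is the Claim_ definition above) =====
theorem solution_spec : Claim_equal_solution := by
  intro topping _
  unfold Spec_solution
  rw [solution_eq_spec, solution_alt_eq_spec]
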